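-- pv_equiv track=rewrite | github.com/vadondaniel/kemono-library | kemono_library/kemono.py | _archive_root_host
-- ===== SOURCE A (Python) =====
-- SUPPORTED_ARCHIVE_HOSTS = {"kemono.cr", "coomer.st"}
--
-- def _normalize_archive_host(raw_host: str | None) -> str | None:
--     if not isinstance(raw_host, str):
--         return None
--     host = raw_host.strip().lower()
--     if not host:
--         return None
--     if "@" in host:
--         host = host.rsplit("@", 1)[-1]
--     host = host.split(":", 1)[0]
--     if host.startswith("www."):
--         host = host[4:]
--     return host or None
--
-- def _archive_root_host(raw_host: str | None) -> str | None:
--     host = _normalize_archive_host(raw_host)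
--     if not host:
--         return None
--     for supported in SUPPORTED_ARCHIVE_HOSTS:
--         if host == supported or host.endswith(f".{supported}"):
--             return supported
--     return None
-- ===== SOURCE B (Python) =====
-- SUPPORTED_ARCHIVE_HOSTS = {"kemono.cr", "coomer.st"}
--
-- def _normalize_archive_host(raw_host):
--     if not isinstance(raw_host, str):
--         return None
--     host = raw_host.strip().lower()
--     if not host:
--         return None
--     if "@" in host:
--         host = host.rsplit("@", 1)[-1]
--     host = host.split(":", 1)[0]
--     if host.startswith("www."):
--         host = host[4:]
--     return host or None
--
-- def _archive_root_host(raw_host):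
--     host = _normalize_archive_host(raw_host)
--     if not host:
--         return None
--     root = ".".join(host.split(".")[-2:])
--     return root if root in SUPPORTED_ARCHIVE_HOSTS else None
-- ===== Notes on version B (the rewrite author's own statement) =====
-- stated objective: simpler
-- what changed: B replaces A's scan over SUPPORTED_ARCHIVE_HOSTS with per-entry equality/endswith tests by computing the registrable root (the last two dot-separated labels) once and probing the set with a single membership test.
import Mathlib
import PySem

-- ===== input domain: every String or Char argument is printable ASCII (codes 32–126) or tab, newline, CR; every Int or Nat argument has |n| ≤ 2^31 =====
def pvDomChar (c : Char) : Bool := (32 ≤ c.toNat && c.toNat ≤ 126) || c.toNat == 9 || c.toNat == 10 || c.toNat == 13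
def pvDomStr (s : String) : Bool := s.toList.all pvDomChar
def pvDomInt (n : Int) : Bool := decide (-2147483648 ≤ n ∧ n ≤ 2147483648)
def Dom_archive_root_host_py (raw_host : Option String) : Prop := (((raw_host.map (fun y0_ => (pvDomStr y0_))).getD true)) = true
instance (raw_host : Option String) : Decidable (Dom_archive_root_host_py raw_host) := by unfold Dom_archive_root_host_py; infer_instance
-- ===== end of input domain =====

-- B replaces A's scan over the supported-host set with equality/suffix tests by computing the
-- registrable root (the last two dot-separated labels) once and probing the set (simpler).

-- ===== PORT A =====
-- shared helper: A and B contain the identical _normalize_archive_host.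
-- 'host.rsplit("@", 1)[-1]' has no PySem primitive; ported by hand as the characters after the
-- last '@' — exact, since the branch only runs when '@' is in host.
-- 'host.split(":", 1)[0]' is the characters before the first ':' — exact.
-- 'host[4:]' is List.drop 4 — exact for a nonnegative in-range literal index.
def normalize_archive_host_py (raw_host : Option String) : Option (List Char) :=
  match raw_host with
  | none => none
  | some s =>
    let host := PySem.Chars.lower (PySem.Chars.strip s.toList)
    if host = [] then none
    else
      let host1 := if PySem.Chars.isIn ['@'] host then (host.reverse.takeWhile (fun c => c ≠ '@')).reverse else host
      let host2 := host1.takeWhile (fun c => c ≠ ':')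
      let host3 := if PySem.Chars.startswith host2 "www.".toList then host2.drop 4 else host2
      if host3 = [] then none else some host3

-- SUPPORTED_ARCHIVE_HOSTS; the Python set's iteration order is irrelevant here: a host can
-- match at most one entry (the two conditions are mutually exclusive), so a fixed order is faithful.
def pvSupportedHosts : List String := ["kemono.cr", "coomer.st"]

def archiveRootLoop : List String → List Char → Option String
  | [], _ => none
  | sup :: rest, host =>
    if host == sup.toList || PySem.Chars.endswith host ('.' :: sup.toList) then some sup
    else archiveRootLoop rest host

def archive_root_host_py (raw_host : Option String) : Option String :=
  match normalize_archive_host_py raw_host with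
  | none => none
  | some host => archiveRootLoop pvSupportedHosts host

-- ===== PORT B =====
def archive_root_host_py_alt (raw_host : Option String) : Option String :=
  match normalize_archive_host_py raw_host with
  | none => none
  | some host =>
    let parts := PySem.Chars.splitOn host ['.']
    let root := PySem.Chars.join ['.'] (PySem.List.slice parts (some (-2)) none)
    if pvSupportedHosts.any (fun sup => sup.toList == root) then some (String.ofList root) else none

-- ===== PRECONDITION & SPEC =====
def Spec_archive_root_host_py (raw_host : Option String) (out : Option String) : Prop := out = archive_root_host_py_alt raw_host
instance (raw_host : Option String) (out : Option String) : Decidable (Spec_archive_root_host_py raw_host out) := by unfold Spec_archive_root_host_py; infer_instance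

-- ===== CLAIM (what is proved, stated in full; the proofs are below) =====
def Claim_equal_archive_root_host_py : Prop := ∀ (raw_host : Option String), Dom_archive_root_host_py raw_host → Spec_archive_root_host_py raw_host (archive_root_host_py raw_host)

-- ===== LEMMAS AND PROOFS =====

theorem pvGo_single (c : Char) : ∀ (fuel : Nat) (l cur : List Char) (acc : List (List Char)),
    l.length ≤ fuel →
    PySem.Chars.splitOn.go [c] fuel l cur acc
      = acc.reverse ++ (List.splitOnP (· == c) l).modifyHead (fun h => cur.reverse ++ h) := by
  intro fuel
  induction fuel with
  | zero =>
    intro l cur acc h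
    have : l = [] := List.eq_nil_of_length_eq_zero (Nat.le_zero.mp h)
    subst this
    simp [PySem.Chars.splitOn.go, List.splitOnP_nil]
  | succ n ih =>
    intro l cur acc h
    cases l with
    | nil => simp [PySem.Chars.splitOn.go, List.splitOnP_nil]
    | cons a rest =>
      by_cases hc : a = c
      · subst hc
        have hpre : List.isPrefixOf [a] (a :: rest) = true := by simp [List.isPrefixOf]
        rw [PySem.Chars.splitOn.go]
        simp only [hpre, if_pos]
        simp only [List.length_cons, List.length_nil, List.drop_succ_cons, List.drop_zero]
        rw [ih rest [] (cur.reverse :: acc) (by simpa using Nat.le_of_succ_le_succ h)]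
        rw [List.splitOnP_cons]
        simp
        cases List.splitOnP (fun x => x == a) rest with
        | nil => rfl
        | cons p ps => rfl
      · have hpre : List.isPrefixOf [c] (a :: rest) = false := by
          simp [List.isPrefixOf, Ne.symm hc]
        rw [PySem.Chars.splitOn.go]
        simp only [hpre, if_neg, Bool.false_eq_true, not_false_iff]
        rw [ih rest (a :: cur) acc (by simpa using Nat.le_of_succ_le_succ h)]
        rw [List.splitOnP_cons]
        have : (a == c) = false := by simp [hc]
        simp only [this, if_neg, Bool.false_eq_true, not_false_iff]
        rcases List.splitOnP_ne_nil (· == c) rest with hne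
        cases hP : List.splitOnP (· == c) rest with
        | nil => exact absurd hP hne
        | cons p ps => simp
theorem pvSplitOn_single (cs : List Char) (c : Char) :
    PySem.Chars.splitOn cs [c] = List.splitOnP (· == c) cs := by
  unfold PySem.Chars.splitOn
  rw [pvGo_single c (cs.length + 1) cs [] [] (Nat.le_succ _)]
  simp
  cases List.splitOnP (fun x => x == c) cs with
  | nil => rfl
  | cons p ps => rfl
theorem pvJoin_suffix (sep : List Char) : ∀ (front t : List (List Char)), front ≠ [] → t ≠ [] →
    (sep ++ PySem.Chars.join sep t) <:+ PySem.Chars.join sep (front ++ t) := by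
  intro front
  induction front with
  | nil => intro t h _; exact absurd rfl h
  | cons f fs ih =>
    intro t _ ht
    cases hfs : fs with
    | nil =>
      cases t with
      | nil => exact absurd rfl ht
      | cons th tt =>
        refine ⟨f, ?_⟩
        simp [PySem.Chars.join, List.intercalate]
    | cons f2 fs2 =>
      have h1 := ih t (by simp [hfs]) ht
      subst hfs
      have : PySem.Chars.join sep (f :: (f2 :: fs2) ++ t) = f ++ sep ++ PySem.Chars.join sep ((f2 :: fs2) ++ t) := by
        simp [PySem.Chars.join, List.intercalate]
      rw [this]
      exact h1.trans (List.suffix_append _ _)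
def pvLastTwo (host : List Char) : List Char :=
  PySem.Chars.join ['.'] ((List.splitOnP (· == '.') host).drop ((List.splitOnP (· == '.') host).length - 2))

theorem pvJoin_splitOnP (host : List Char) :
    PySem.Chars.join ['.'] (List.splitOnP (· == '.') host) = host := by
  have := List.intercalate_splitOn host '.'
  simpa [PySem.Chars.join, List.splitOn] using this

theorem pvLastTwo_spec (host : List Char) :
    pvLastTwo host = host ∨ ('.' :: pvLastTwo host) <:+ host := by
  unfold pvLastTwo
  by_cases hn : (List.splitOnP (· == '.') host).length ≤ 2
  · left
    have h0 : (List.splitOnP (· == '.') host).length - 2 = 0 := by omega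
    rw [h0, List.drop_zero, pvJoin_splitOnP]
  · right
    have hfront : (List.splitOnP (· == '.') host).take ((List.splitOnP (· == '.') host).length - 2) ≠ [] := by
      have hl : ((List.splitOnP (· == '.') host).take ((List.splitOnP (· == '.') host).length - 2)).length = (List.splitOnP (· == '.') host).length - 2 := List.length_take_of_le (by omega)
      intro h; rw [h] at hl; simp at hl; omega
    have ht : (List.splitOnP (· == '.') host).drop ((List.splitOnP (· == '.') host).length - 2) ≠ [] := by
      have hl := List.length_drop (l := List.splitOnP (· == '.') host) (i := (List.splitOnP (· == '.') host).length - 2)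
      intro h; rw [h] at hl; simp at hl; omega
    have hsuf := pvJoin_suffix ['.'] _ _ hfront ht
    rw [List.take_append_drop, pvJoin_splitOnP] at hsuf
    exact hsuf
theorem pvSplit_ab (a b : List Char)
    (ha : ∀ x ∈ a, ¬ (x == '.') = true) (hb : ∀ x ∈ b, ¬ (x == '.') = true) :
    List.splitOnP (· == '.') (a ++ '.' :: b) = [a, b] := by
  rw [List.splitOnP_first _ a ha '.' (by simp) b, List.splitOnP_eq_single _ _ hb]

theorem pvJoin_ab (a b : List Char) :
    PySem.Chars.join ['.'] [a, b] = a ++ '.' :: b := by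
  simp [PySem.Chars.join, List.intercalate]

theorem pvCond_iff (host a b : List Char)
    (ha : ∀ x ∈ a, ¬ (x == '.') = true) (hb : ∀ x ∈ b, ¬ (x == '.') = true) :
    (host == (a ++ '.' :: b) || PySem.Chars.endswith host ('.' :: (a ++ '.' :: b))) = true
      ↔ pvLastTwo host = a ++ '.' :: b := by
  constructor
  · intro h
    rcases Bool.or_eq_true_iff.mp h with h | h
    · have hh : host = a ++ '.' :: b := by simpa using h
      subst hh
      unfold pvLastTwo
      rw [pvSplit_ab a b ha hb]
      simp [pvJoin_ab]
    · have hh : ('.' :: (a ++ '.' :: b)) <:+ host := (PySem.Chars.endswith_iff _ _).mp h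
      obtain ⟨x, hx⟩ := hh
      subst hx
      unfold pvLastTwo
      have hsp : List.splitOnP (· == '.') (x ++ '.' :: (a ++ '.' :: b))
          = List.splitOnP (· == '.') x ++ [a, b] := by
        rw [List.splitOnP_append_cons _ x _ '.' (by simp), pvSplit_ab a b ha hb]
      rw [hsp]
      have hm : (List.splitOnP (· == '.') x ++ [a, b]).length - 2
          = (List.splitOnP (· == '.') x).length := by simp
      rw [hm, List.drop_left, pvJoin_ab]
  · intro h
    rcases pvLastTwo_spec host with hs | hs
    · rw [h] at hs
      apply Bool.or_eq_true_iff.mpr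
      left
      simp [hs]
    · rw [h] at hs
      apply Bool.or_eq_true_iff.mpr
      right
      exact (PySem.Chars.endswith_iff _ _).mpr hs
theorem pvKey (host : List Char) :
    archiveRootLoop pvSupportedHosts host
      = (if pvSupportedHosts.any (fun sup => sup.toList ==
            PySem.Chars.join ['.'] (PySem.List.slice (PySem.Chars.splitOn host ['.']) (some (-2)) none))
         then some (String.ofList (PySem.Chars.join ['.'] (PySem.List.slice (PySem.Chars.splitOn host ['.']) (some (-2)) none)))
         else none) := by
  have hslice : PySem.Chars.join ['.'] (PySem.List.slice (PySem.Chars.splitOn host ['.']) (some (-2)) none)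
      = pvLastTwo host := by
    rw [pvSplitOn_single, PySem.List.slice_from_neg_ofNat _ 2 (by omega)]
    rfl
  rw [hslice]
  have hkc := pvCond_iff host "kemono".toList "cr".toList
    (by have h : "kemono".toList = ['k','e','m','o','n','o'] := rfl
        rw [h]; intro x hx
        simp only [List.mem_cons, List.not_mem_nil, or_false] at hx
        rcases hx with rfl | rfl | rfl | rfl | rfl | rfl <;> decide)
    (by have h : "cr".toList = ['c','r'] := rfl
        rw [h]; intro x hx
        simp only [List.mem_cons, List.not_mem_nil, or_false] at hx
        rcases hx with rfl | rfl <;> decide)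
  have hco := pvCond_iff host "coomer".toList "st".toList
    (by have h : "coomer".toList = ['c','o','o','m','e','r'] := rfl
        rw [h]; intro x hx
        simp only [List.mem_cons, List.not_mem_nil, or_false] at hx
        rcases hx with rfl | rfl | rfl | rfl | rfl | rfl <;> decide)
    (by have h : "st".toList = ['s','t'] := rfl
        rw [h]; intro x hx
        simp only [List.mem_cons, List.not_mem_nil, or_false] at hx
        rcases hx with rfl | rfl <;> decide)
  have e1 : "kemono".toList ++ '.' :: "cr".toList = "kemono.cr".toList := rfl
  have e2 : "coomer".toList ++ '.' :: "st".toList = "coomer.st".toList := rfl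
  rw [e1] at hkc
  rw [e2] at hco
  simp only [pvSupportedHosts, archiveRootLoop, List.any_cons, List.any_nil, Bool.or_false]
  by_cases h1 : pvLastTwo host = "kemono.cr".toList
  · rw [if_pos (hkc.mpr h1)]
    have : ("kemono.cr".toList == pvLastTwo host) = true := by simp [h1]
    rw [this]
    simp only [Bool.true_or, if_pos]
    rw [h1]
    rfl
  · have hc1 : (host == "kemono.cr".toList || PySem.Chars.endswith host ('.' :: "kemono.cr".toList)) = false := by
      rcases hb : (host == "kemono.cr".toList || PySem.Chars.endswith host ('.' :: "kemono.cr".toList)) with _ | _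
      · rfl
      · exact absurd (hkc.mp hb) h1
    rw [hc1]
    simp only [Bool.false_eq_true, if_false]
    have hb1 : ("kemono.cr".toList == pvLastTwo host) = false := by
      simp; intro h; exact absurd h.symm h1
    rw [hb1, Bool.false_or]
    by_cases h2 : pvLastTwo host = "coomer.st".toList
    · rw [if_pos (hco.mpr h2)]
      have : ("coomer.st".toList == pvLastTwo host) = true := by simp [h2]
      rw [this]
      simp only [if_pos]
      rw [h2]
      rfl
    · have hc2 : (host == "coomer.st".toList || PySem.Chars.endswith host ('.' :: "coomer.st".toList)) = false := by
        rcases hb : (host == "coomer.st".toList || PySem.Chars.endswith host ('.' :: "coomer.st".toList)) with _ | _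
        · rfl
        · exact absurd (hco.mp hb) h2
      rw [hc2]
      simp only [Bool.false_eq_true, if_false]
      have hb2 : ("coomer.st".toList == pvLastTwo host) = false := by
        simp; intro h; exact absurd h.symm h2
      rw [hb2]
      simp

-- ===== VERDICT (by name: the statement is the Claim_ definition above) =====
theorem archive_root_host_py_spec : Claim_equal_archive_root_host_py := by
  intro raw_host _
  unfold Spec_archive_root_host_py archive_root_host_py archive_root_host_py_alt
  cases normalize_archive_host_py raw_host with
  | none => rfl
  | some host => simpa using pvKey host
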